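-- pv_equiv track=rewrite | github.com/Priyanshu23u/Primaspot_AI_Assignment | backend/analytics/tasks.py | _determine_primary_subject
-- ===== SOURCE A (Python) =====
-- def _determine_primary_subject(caption: str) -> str:
--     """Determine primary subject from caption"""
--     if any(word in caption.lower() for word in ['family', 'kids', 'children']):
--         return 'family'
--     elif any(word in caption.lower() for word in ['team', 'group', 'friends']):
--         return 'group'
--     elif any(word in caption.lower() for word in ['car', 'bike', 'vehicle']):
--         return 'vehicle'
--     elif any(word in caption.lower() for word in ['food', 'meal', 'cooking']):
--         return 'food'
--     else:
--         return 'person'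
-- ===== SOURCE B (Python) =====
-- _CATS = ('family', 'group', 'vehicle', 'food')
-- _KEYWORDS = (('family', 0), ('kids', 0), ('children', 0),
--              ('team', 1), ('group', 1), ('friends', 1),
--              ('car', 2), ('bike', 2), ('vehicle', 2),
--              ('food', 3), ('meal', 3), ('cooking', 3))
--
-- def _determine_primary_subject(caption: str) -> str:
--     """Single scan over the lowered caption: collect a bitmask of every
--     category whose keyword occurs anywhere, then decode by priority."""
--     low = caption.lower()
--     mask = 0
--     for i in range(len(low)):
--         for w, c in _KEYWORDS:
--             if low.startswith(w, i):
--                 mask |= 1 << c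
--     for c in range(4):
--         if mask >> c & 1:
--             return _CATS[c]
--     return 'person'
-- ===== Notes on version B (the rewrite author's own statement) =====
-- stated objective: alternative
-- what changed: Instead of A's four per-category substring searches over the lowered caption, B makes one left-to-right scan over the positions of the lowered caption, setting a category bit in a mask for every keyword that starts at each position, and then decodes the bitmask in priority order.
import Mathlib
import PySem

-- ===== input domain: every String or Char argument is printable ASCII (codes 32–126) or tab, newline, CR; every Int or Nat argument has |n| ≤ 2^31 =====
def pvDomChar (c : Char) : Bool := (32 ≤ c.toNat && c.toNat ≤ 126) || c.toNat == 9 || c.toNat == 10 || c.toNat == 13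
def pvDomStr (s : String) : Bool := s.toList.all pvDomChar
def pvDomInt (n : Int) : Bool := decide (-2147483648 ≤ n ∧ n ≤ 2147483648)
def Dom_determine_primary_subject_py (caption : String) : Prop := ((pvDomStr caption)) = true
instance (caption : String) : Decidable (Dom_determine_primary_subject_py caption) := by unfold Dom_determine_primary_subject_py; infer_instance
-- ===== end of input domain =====

-- B replaces A's per-category substring searches with a single scan of the lowered caption that
-- accumulates a bitmask of all matching categories, then decodes the mask by priority (alternative algorithm).


-- ===== PORT A =====
-- A: literal port — each branch recomputes caption.lower() and tests 'word in …' for each keyword.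
def determine_primary_subject_py (caption : String) : String :=
  if ["family", "kids", "children"].any (fun w => PySem.Str.isIn w (PySem.Str.lower caption)) then
    "family"
  else if ["team", "group", "friends"].any (fun w => PySem.Str.isIn w (PySem.Str.lower caption)) then
    "group"
  else if ["car", "bike", "vehicle"].any (fun w => PySem.Str.isIn w (PySem.Str.lower caption)) then
    "vehicle"
  else if ["food", "meal", "cooking"].any (fun w => PySem.Str.isIn w (PySem.Str.lower caption)) then
    "food"
  else
    "person"

-- ===== PORT B =====
-- B: one scan over the positions of the lowered caption; at each position every keyword that starts
-- there sets its category's bit in a mask; at the end the mask is decoded in priority order.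
def pvCats : List String := ["family", "group", "vehicle", "food"]

def pvKeywords : List (List Char × Nat) :=
  [("family".toList, 0), ("kids".toList, 0), ("children".toList, 0),
   ("team".toList, 1), ("group".toList, 1), ("friends".toList, 1),
   ("car".toList, 2), ("bike".toList, 2), ("vehicle".toList, 2),
   ("food".toList, 3), ("meal".toList, 3), ("cooking".toList, 3)]

-- low.startswith(w, i) for 0 ≤ i < len(low) is exactly w.isPrefixOf (low.drop i)
def pvScan (low : List Char) : Nat :=
  (List.range low.length).foldl
    (fun m i =>
      pvKeywords.foldl
        (fun m wc => if wc.1.isPrefixOf (low.drop i) then m ||| (1 <<< wc.2) else m) m)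
    0

-- 'for c in range(4): if mask >> c & 1: return _CATS[c]' ; 'mask >> c & 1' truthy ↔ Nat.testBit mask c
def pvPick (mask : Nat) : List Nat → String
  | [] => "person"
  | c :: rest => if mask.testBit c then pvCats.getD c "person" else pvPick mask rest

def determine_primary_subject_py_alt (caption : String) : String :=
  pvPick (pvScan (PySem.Str.lower caption).toList) (List.range 4)

-- ===== PRECONDITION & SPEC =====
def Spec_determine_primary_subject_py (caption : String) (out : String) : Prop := out = determine_primary_subject_py_alt caption
instance (caption : String) (out : String) : Decidable (Spec_determine_primary_subject_py caption out) := by unfold Spec_determine_primary_subject_py; infer_instance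

-- ===== CLAIM (what is proved, stated in full; the proofs are below) =====
def Claim_equal_determine_primary_subject_py : Prop := ∀ (caption : String), Dom_determine_primary_subject_py caption → Spec_determine_primary_subject_py caption (determine_primary_subject_py caption)

-- ===== LEMMAS AND PROOFS =====

-- bit c of the inner keyword fold: old bit, or some keyword of category c starts at position i
lemma pv_inner_bit (low : List Char) (i : Nat) (l : List (List Char × Nat)) (m0 c : Nat) :
    (l.foldl (fun m wc => if wc.1.isPrefixOf (low.drop i) then m ||| (1 <<< wc.2) else m) m0).testBit c
      = (m0.testBit c || l.any (fun wc => wc.1.isPrefixOf (low.drop i) && (wc.2 == c))) := by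
  induction l generalizing m0 with
  | nil => simp
  | cons wc l ih =>
    simp only [List.foldl_cons, List.any_cons, ih]
    by_cases h : wc.1.isPrefixOf (low.drop i)
    · simp [h, Nat.testBit_or, Nat.one_shiftLeft, Nat.testBit_two_pow, Bool.or_assoc, beq_eq_decide]
    · simp [h]

-- bit c of the position fold: old bit, or some keyword of category c starts at some scanned position
lemma pv_outer_bit (low : List Char) (ns : List Nat) (m0 c : Nat) :
    (ns.foldl
        (fun m i =>
          pvKeywords.foldl
            (fun m wc => if wc.1.isPrefixOf (low.drop i) then m ||| (1 <<< wc.2) else m) m)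
        m0).testBit c
      = (m0.testBit c ||
          ns.any (fun i => pvKeywords.any (fun wc => wc.1.isPrefixOf (low.drop i) && (wc.2 == c)))) := by
  induction ns generalizing m0 with
  | nil => simp
  | cons n ns ih => rw [List.foldl_cons, ih, pv_inner_bit, List.any_cons, Bool.or_assoc]

-- bit c of the scan (c a category index) = some keyword of category c is a substring of low
lemma pv_scan_bit (low : List Char) (c : Nat) :
    (pvScan low).testBit c
      = pvKeywords.any (fun wc => (wc.2 == c) && PySem.Chars.isIn wc.1 low) := by
  unfold pvScan
  rw [pv_outer_bit]
  rw [Bool.eq_iff_iff]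
  simp only [Nat.zero_testBit, Bool.false_or, List.any_eq_true, List.mem_range,
    Bool.and_eq_true, beq_iff_eq, List.isPrefixOf_iff_prefix,
    ← PySem.Chars.exists_prefix_drop_iff_isIn]
  constructor
  · rintro ⟨i, hi, wc, hm, hp, hc⟩
    exact ⟨wc, hm, hc, i, hp⟩
  · rintro ⟨wc, hm, hc, j, hp⟩
    have hw : wc.1 ≠ [] := by
      fin_cases hm <;> simp
    by_cases hj : j < low.length
    · exact ⟨j, hj, wc, hm, hp, hc⟩
    · exfalso
      have : low.drop j = [] := List.drop_eq_nil_of_le (le_of_not_gt hj)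
      rw [this, List.prefix_nil] at hp
      exact hw hp

-- ===== VERDICT (by name: the statement is the Claim_ definition above) =====
theorem determine_primary_subject_py_spec : Claim_equal_determine_primary_subject_py := by
  intro caption _
  unfold Spec_determine_primary_subject_py determine_primary_subject_py determine_primary_subject_py_alt
  have h4 : List.range 4 = [0, 1, 2, 3] := by decide
  rw [h4]
  simp only [pvPick, pv_scan_bit, pvKeywords, pvCats, List.any_cons, List.any_nil]
  simp [PySem.Str.isIn_eq]
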